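-- pv_equiv track=rewrite | github.com/ArunAaryan/practice_dsa | NivenNumber.py | niven_number
-- ===== SOURCE A (Python) =====
-- def niven_number(n):
--     nc = n
--     sum = 0
--     while n:
--         r = n % 10
--         sum += r
--         n //= 10
--     return nc // sum
-- ===== SOURCE B (Python) =====
-- def niven_number(n):
--     s = sum(int(c) for c in str(n))
--     return n // s
-- ===== Notes on version B (the rewrite author's own statement) =====
-- stated objective: idiomatic
-- what changed: Digit sum is computed by iterating over the characters of str(n) instead of the arithmetic %10 // 10 peeling loop, and n is never mutated so no saved copy is needed.
import Mathlib
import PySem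

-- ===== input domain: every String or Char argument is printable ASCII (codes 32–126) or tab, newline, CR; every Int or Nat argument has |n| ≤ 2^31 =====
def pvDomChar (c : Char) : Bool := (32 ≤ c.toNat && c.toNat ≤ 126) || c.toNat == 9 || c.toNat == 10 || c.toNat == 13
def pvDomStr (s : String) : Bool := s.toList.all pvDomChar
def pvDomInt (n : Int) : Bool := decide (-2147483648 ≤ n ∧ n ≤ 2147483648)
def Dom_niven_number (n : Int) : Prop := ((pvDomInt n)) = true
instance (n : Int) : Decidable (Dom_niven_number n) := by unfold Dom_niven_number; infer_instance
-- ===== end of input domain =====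

-- B computes the digit sum by iterating over the characters of str(n) instead of A's
-- arithmetic %10 // 10 peeling loop (idiomatic; return value only).

-- ===== PORT A =====
-- A's 'while n:' loop; Python diverges for n < 0, so the guard 'n ≤ 0' only
-- totalizes the recursion (it coincides with 'n = 0' on every input where A returns).
def nivenLoopA (n s : Int) : Int :=
  if h : n ≤ 0 then s
  else nivenLoopA (PySem.Int.floordiv n 10) (s + PySem.Int.mod n 10)
termination_by n.toNat
decreasing_by
  have hn : 0 < n := lt_of_not_ge h
  have he : PySem.Int.floordiv n 10 = n / 10 := by
    simp only [PySem.Int.floordiv]; exact Int.fdiv_eq_ediv_of_nonneg n (by norm_num)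
  have h3 : n / 10 < n := by omega
  omega

def niven_number (n : Int) : Int :=
  PySem.Int.floordiv n (nivenLoopA n 0)

-- ===== PORT B =====
-- int(c) for one character; .getD 0 only totalizes (inside Pre_ every character is a digit,
-- so int(c) never raises).
def charIntVal (c : Char) : Int :=
  (PySem.Int.ofStr? (String.ofList [c])).getD 0

def niven_number_alt (n : Int) : Int :=
  let s := (PySem.Int.toStr n).toList.foldl (fun acc c => acc + charIntVal c) 0
  PySem.Int.floordiv n s

-- ===== PRECONDITION & SPEC =====
-- A returns only for n > 0: at n = 0 it raises ZeroDivisionError (sum = 0),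
-- and for n < 0 its while loop never terminates (n //= 10 stalls at -1).
def Pre_niven_number (n : Int) : Prop := 0 < n
instance (n : Int) : Decidable (Pre_niven_number n) := by unfold Pre_niven_number; infer_instance
def pvWitness_niven_number : Int := (12)
def Spec_niven_number (n : Int) (out : Int) : Prop := out = niven_number_alt n
instance (n : Int) (out : Int) : Decidable (Spec_niven_number n out) := by unfold Spec_niven_number; infer_instance

-- ===== CLAIM (what is proved, stated in full; the proofs are below) =====
def Claim_equal_niven_number : Prop := ∀ (n : Int), Dom_niven_number n → Pre_niven_number n → Spec_niven_number n (niven_number n)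

-- ===== LEMMAS AND PROOFS =====

-- the digit sum that Nat.toDigitsCore emits for m
def gsum (m : Nat) : Nat :=
  if h : m / 10 = 0 then m % 10
  else m % 10 + gsum (m / 10)
decreasing_by
  exact Nat.div_lt_self (by omega) (by norm_num)

theorem charIntVal_digitChar (r : Nat) (h : r < 10) :
    charIntVal (Nat.digitChar r) = (r : Int) := by
  interval_cases r <;> decide

def csum (l : List Char) : Int := (l.map charIntVal).sum

theorem gsum_eq (m : Nat) :
    gsum m = m % 10 + (if m / 10 = 0 then 0 else gsum (m / 10)) := by
  rw [gsum]; split_ifs <;> simp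

theorem csum_toDigitsCore (fuel : Nat) :
    ∀ (m : Nat) (ds : List Char), m < fuel →
      csum (Nat.toDigitsCore 10 fuel m ds) = (gsum m : Int) + csum ds := by
  induction fuel with
  | zero => intro m ds h; omega
  | succ fuel ih =>
    intro m ds hm
    rw [Nat.toDigitsCore]
    by_cases h0 : m / 10 = 0
    · rw [if_pos h0]
      simp only [csum, List.map_cons, List.sum_cons]
      rw [charIntVal_digitChar _ (Nat.mod_lt _ (by norm_num)), gsum_eq m, if_pos h0]
      push_cast; ring
    · have hdiv : m / 10 < fuel := by
        have h1 : m / 10 < m := Nat.div_lt_self (by omega) (by norm_num)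
        omega
      rw [if_neg h0, ih (m / 10) _ hdiv]
      simp only [csum, List.map_cons, List.sum_cons]
      rw [charIntVal_digitChar _ (Nat.mod_lt _ (by norm_num)), gsum_eq m, if_neg h0]
      push_cast; ring

theorem nivenLoopA_eq (k : Nat) : ∀ (n s : Int), n.toNat = k → 0 < n →
    nivenLoopA n s = s + (gsum n.toNat : Int) := by
  induction k using Nat.strong_induction_on with
  | _ k ih =>
    intro n s hk hn
    rw [nivenLoopA, dif_neg (not_le.mpr hn)]
    have h10 : (0:Int) < 10 := by norm_num
    have hfd : PySem.Int.floordiv n 10 = n / 10 := by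
      simp only [PySem.Int.floordiv]; exact Int.fdiv_eq_ediv_of_nonneg n (by norm_num)
    have hfm : PySem.Int.mod n 10 = n % 10 := by
      simp only [PySem.Int.mod]; rw [Int.fmod_eq_emod]; simp
    have hmodnat : n % 10 = ((n.toNat % 10 : Nat) : Int) := by omega
    have hdivnat : n / 10 = ((n.toNat / 10 : Nat) : Int) := by omega
    rw [hfd, hfm]
    by_cases h0 : n.toNat / 10 = 0
    · have hz : n / 10 = 0 := by rw [hdivnat, h0]; rfl
      rw [hz, nivenLoopA, dif_pos (le_refl 0)]
      rw [gsum_eq n.toNat, if_pos h0, hmodnat]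
      push_cast
      ring
    · have hpos : 0 < n / 10 := by rw [hdivnat]; omega
      have hlt : n.toNat / 10 < k := by
        have : n.toNat / 10 < n.toNat := Nat.div_lt_self (by omega) (by norm_num)
        omega
      have := ih (n.toNat / 10) hlt (n / 10) (s + n % 10) (by rw [hdivnat]; omega) hpos
      rw [this]
      have h2 : (n / 10).toNat = n.toNat / 10 := by rw [hdivnat]; omega
      rw [h2, gsum_eq n.toNat, if_neg h0, hmodnat]
      push_cast
      ring

theorem foldl_add_csum (l : List Char) : ∀ (a : Int),
    l.foldl (fun acc c => acc + charIntVal c) a = a + csum l := by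
  induction l with
  | nil => intro a; simp [csum]
  | cons c t ih =>
    intro a
    simp only [List.foldl_cons, csum, List.map_cons, List.sum_cons, ih]
    ring

theorem csum_toChars (n : Int) (hn : 0 < n) :
    csum (PySem.Int.toStr n).toList = (gsum n.toNat : Int) := by
  rw [PySem.Int.toList_toStr]
  simp only [PySem.Int.toChars, if_neg (not_lt.mpr (le_of_lt hn))]
  rw [Nat.toDigits, csum_toDigitsCore (n.toNat + 1) n.toNat [] (by omega)]
  simp [csum]

-- ===== VERDICT (by name: the statement is the Claim_ definition above) =====
theorem niven_number_spec : Claim_equal_niven_number := by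
  intro n _ hpre
  unfold Spec_niven_number niven_number niven_number_alt
  rw [nivenLoopA_eq n.toNat n 0 rfl hpre, foldl_add_csum, csum_toChars n hpre]
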